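-- pv_equiv track=rewrite | github.com/iZelikov/beegeek-algo | task_10_2.py | count_pythagorean_triplets
-- ===== SOURCE A (Python) =====
-- def count_pythagorean_triplets(nums1, nums2, nums3):
--     count = 0
--     c_s = {}
--     for i in nums3:
--         c_s[i ** 2] = c_s.get(i ** 2, 0) + 1
--     for a in nums1:
--         for b in nums2:
--             count += c_s.get(a ** 2 + b ** 2, 0)
--     return count
-- ===== SOURCE B (Python) =====
-- def count_pythagorean_triplets(nums1, nums2, nums3):
--     pair_sums = {}
--     for a in nums1:
--         a2 = a * a
--         for b in nums2:
--             s = a2 + b * b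
--             pair_sums[s] = pair_sums.get(s, 0) + 1
--     total = 0
--     for c in nums3:
--         total += pair_sums.get(c * c, 0)
--     return total
-- ===== Notes on version B (the rewrite author's own statement) =====
-- stated objective: alternative
-- what changed: B moves the nested loop into the table-building phase: it builds a multiset of achievable pair-sums a^2+b^2 from nums1 x nums2, then counts with a single pass over nums3, instead of A's multiset of c^2 values queried inside the double loop.
import Mathlib
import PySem

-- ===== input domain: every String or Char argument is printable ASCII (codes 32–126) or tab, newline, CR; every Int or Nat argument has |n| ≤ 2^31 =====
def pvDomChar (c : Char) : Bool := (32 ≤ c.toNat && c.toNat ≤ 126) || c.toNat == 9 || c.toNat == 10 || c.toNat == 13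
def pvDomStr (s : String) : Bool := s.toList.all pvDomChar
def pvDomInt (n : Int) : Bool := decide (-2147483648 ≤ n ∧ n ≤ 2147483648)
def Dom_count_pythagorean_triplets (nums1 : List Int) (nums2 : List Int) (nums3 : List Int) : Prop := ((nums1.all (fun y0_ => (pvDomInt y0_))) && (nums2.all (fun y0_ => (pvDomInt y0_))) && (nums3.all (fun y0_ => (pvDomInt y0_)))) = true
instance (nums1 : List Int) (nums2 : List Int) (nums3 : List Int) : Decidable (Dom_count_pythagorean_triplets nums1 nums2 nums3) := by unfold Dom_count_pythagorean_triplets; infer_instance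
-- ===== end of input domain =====

-- B builds the multiset of pair-sums a^2+b^2 from nums1 x nums2 and counts in one pass over
-- nums3, instead of A's multiset of c^2 queried inside the double loop (alternative decomposition).

-- ===== PORT A =====
def count_pythagorean_triplets (nums1 : List Int) (nums2 : List Int) (nums3 : List Int) : Int :=
  let c_s : PySem.Dict Int Int :=
    nums3.foldl (fun d i => d.insert (i ^ 2) (d.getD (i ^ 2) 0 + 1)) PySem.Dict.empty
  nums1.foldl (fun count a =>
    nums2.foldl (fun count b => count + c_s.getD (a ^ 2 + b ^ 2) 0) count) 0

-- ===== PORT B =====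
def count_pythagorean_triplets_alt (nums1 : List Int) (nums2 : List Int) (nums3 : List Int) : Int :=
  let pair_sums : PySem.Dict Int Int :=
    nums1.foldl (fun d a =>
      nums2.foldl (fun d b => d.insert (a * a + b * b) (d.getD (a * a + b * b) 0 + 1)) d)
      PySem.Dict.empty
  nums3.foldl (fun total c => total + pair_sums.getD (c * c) 0) 0

-- ===== PRECONDITION & SPEC =====
def Spec_count_pythagorean_triplets (nums1 : List Int) (nums2 : List Int) (nums3 : List Int) (out : Int) : Prop := out = count_pythagorean_triplets_alt nums1 nums2 nums3
instance (nums1 : List Int) (nums2 : List Int) (nums3 : List Int) (out : Int) : Decidable (Spec_count_pythagorean_triplets nums1 nums2 nums3 out) := by unfold Spec_count_pythagorean_triplets; infer_instance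

-- ===== CLAIM (what is proved, stated in full; the proofs are below) =====
def Claim_equal_count_pythagorean_triplets : Prop := ∀ (nums1 : List Int) (nums2 : List Int) (nums3 : List Int), Dom_count_pythagorean_triplets nums1 nums2 nums3 → Spec_count_pythagorean_triplets nums1 nums2 nums3 (count_pythagorean_triplets nums1 nums2 nums3)

-- ===== LEMMAS AND PROOFS =====

/-- Building a counter over the concatenation of per-element lists equals the nested fold. -/
theorem pv_foldl_flatMap {α : Type} (step : PySem.Dict Int Int → Int → PySem.Dict Int Int)
    (f : α → List Int) :
    ∀ (l : List α) (d : PySem.Dict Int Int),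
      l.foldl (fun d a => (f a).foldl step d) d = (l.flatMap f).foldl step d := by
  intro l
  induction l with
  | nil => intro d; simp
  | cons a t ih => intro d; simp [List.foldl_append, ih]

/-- Σ of the indicator of p over t is t.count p. -/
theorem pv_sum_ite (p : Int) (t : List Int) :
    (t.map (fun i => if p = i then (1 : Int) else 0)).sum = ((t.count p : Nat) : Int) := by
  induction t with
  | nil => simp
  | cons i t ih =>
      by_cases h : p = i
      · subst h
        simp only [List.map_cons, List.sum_cons, if_pos rfl, List.count_cons_self, ih]
        push_cast
        ring
      · have h' : ¬ i = p := fun e => h e.symm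
        simp [h, h', List.count_cons, ih]

/-- Σ over Q of (p::P).count splits off Q.count p. -/
theorem pv_sum_count_cons (Q : List Int) (p : Int) (P : List Int) :
    (Q.map (fun q => (((p :: P).count q : Nat) : Int))).sum
      = ((Q.count p : Nat) : Int) + (Q.map (fun q => ((P.count q : Nat) : Int))).sum := by
  induction Q with
  | nil => simp
  | cons q t ih =>
      by_cases h : q = p
      · subst h
        simp [List.count_cons, pv_sum_ite]
        ring
      · have h' : ¬ p = q := fun e => h e.symm
        simp [List.count_cons, h, h', pv_sum_ite]
        ring

/-- The symmetric counting identity: Σ_{p∈P} Q.count p = Σ_{q∈Q} P.count q. -/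
theorem pv_sum_count_symm (P Q : List Int) :
    (P.map (fun s => ((Q.count s : Nat) : Int))).sum
      = (Q.map (fun s => ((P.count s : Nat) : Int))).sum := by
  induction P with
  | nil => simp
  | cons p t ih => simp [pv_sum_count_cons, ih]

/-- Sum of a function over a flatMap is the nested sum. -/
theorem pv_sum_map_flatMap {α β : Type} (l : List α) (f : α → List β) (h : β → Int) :
    ((l.flatMap f).map h).sum = (l.map (fun a => (((f a).map h).sum))).sum := by
  induction l with
  | nil => simp
  | cons a t ih => simp [ih]

-- ===== VERDICT (by name: the statement is the Claim_ definition above) =====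
theorem count_pythagorean_triplets_spec : Claim_equal_count_pythagorean_triplets := by
  intro nums1 nums2 nums3 _
  unfold Spec_count_pythagorean_triplets count_pythagorean_triplets count_pythagorean_triplets_alt
  set S3 : List Int := nums3.map (fun i => i ^ 2) with hS3
  set P : List Int := nums1.flatMap (fun a => nums2.map (fun b => a * a + b * b)) with hP
  -- A's dictionary is the counter of the squared nums3
  have hA_dict :
      nums3.foldl (fun d i => d.insert (i ^ 2) (d.getD (i ^ 2) 0 + 1))
          (PySem.Dict.empty : PySem.Dict Int Int)
        = PySem.Dict.counter S3 := by
    rw [hS3, ← PySem.Dict.foldl_insert_getD_add_one_eq_counter, List.foldl_map]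
  -- B's dictionary is the counter of the pair-sums
  have h1 : ∀ (a : Int) (d : PySem.Dict Int Int),
      nums2.foldl (fun d b => d.insert (a * a + b * b) (d.getD (a * a + b * b) 0 + 1)) d
        = (nums2.map (fun b => a * a + b * b)).foldl
            (fun d x => d.insert x (d.getD x 0 + 1)) d := by
    intro a d; rw [List.foldl_map]
  have hB_dict :
      nums1.foldl (fun d a =>
          nums2.foldl (fun d b => d.insert (a * a + b * b) (d.getD (a * a + b * b) 0 + 1)) d)
        (PySem.Dict.empty : PySem.Dict Int Int) = PySem.Dict.counter P := by
    simp only [h1]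
    rw [pv_foldl_flatMap, ← hP, PySem.Dict.foldl_insert_getD_add_one_eq_counter]
  rw [hA_dict, hB_dict]
  -- A's counting loop as a sum over the pair-sum list P
  have hinner : ∀ (a : Int) (c : Int),
      nums2.foldl (fun count b => count + (PySem.Dict.counter S3).getD (a ^ 2 + b ^ 2) 0) c
        = c + ((nums2.map (fun b => a * a + b * b)).map
                (fun s => ((S3.count s : Nat) : Int))).sum := by
    intro a c
    rw [PySem.List.foldl_add (g := fun b => (PySem.Dict.counter S3).getD (a ^ 2 + b ^ 2) 0)]
    congr 1
    rw [List.map_map]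
    apply congrArg List.sum
    apply List.map_congr_left
    intro b _
    simp only [Function.comp, PySem.Dict.getD_counter]
    rw [show a * a + b * b = a ^ 2 + b ^ 2 by ring]
  have hA_sum :
      nums1.foldl (fun count a =>
          nums2.foldl (fun count b => count + (PySem.Dict.counter S3).getD (a ^ 2 + b ^ 2) 0) count) 0
        = (P.map (fun s => ((S3.count s : Nat) : Int))).sum := by
    simp only [hinner]
    rw [PySem.List.foldl_add, hP, pv_sum_map_flatMap]
    simp
  -- B's counting loop as a sum over the squared nums3
  have hB_sum :
      nums3.foldl (fun total c => total + (PySem.Dict.counter P).getD (c * c) 0) 0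
        = (S3.map (fun s => ((P.count s : Nat) : Int))).sum := by
    rw [PySem.List.foldl_add (g := fun c => (PySem.Dict.counter P).getD (c * c) 0), hS3,
      List.map_map, zero_add]
    apply congrArg List.sum
    apply List.map_congr_left
    intro c _
    simp only [Function.comp, PySem.Dict.getD_counter]
    rw [show c * c = c ^ 2 by ring]
  rw [hA_sum, hB_sum, pv_sum_count_symm]
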